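-- pv_equiv track=rewrite | github.com/evantao96/aoc2019 | day4/aoc4.py | has_double_digit
-- ===== SOURCE A (Python) =====
-- def has_double_digit(num):
-- 	pairs = list(zip(str(num), str(num)[1:]))
-- 	count_pairs = {}
-- 	for digit_1, digit_2 in pairs:
-- 		if digit_1 == digit_2:
-- 			if (digit_1, digit_2) in count_pairs:
-- 				count_pairs[(digit_1, digit_2)] += 1
-- 			else:
-- 				count_pairs[(digit_1, digit_2)] = 1
-- 	return 1 in count_pairs.values()
-- ===== SOURCE B (Python) =====
-- def _runs_go(c, n, s):
--     # runs of (c repeated n times) + s, where the run of c may continue into s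
--     if not s:
--         return [(c, n)]
--     if s[0] == c:
--         return _runs_go(c, n + 1, s[1:])
--     return [(c, n)] + _runs_go(s[0], 1, s[1:])
--
-- def _runs(s):
--     # maximal runs of equal characters, as (char, length) pairs
--     if not s:
--         return []
--     return _runs_go(s[0], 1, s[1:])
--
-- def has_double_digit(num):
--     counts = {}
--     for ch, n in _runs(str(num)):
--         counts[ch] = counts.get(ch, 0) + (n - 1)
--     return 1 in counts.values()
-- ===== Notes on version B (the rewrite author's own statement) =====
-- stated objective: alternative
-- what changed: B run-length-encodes str(num) into maximal runs of equal characters and accumulates (run_length - 1) per character in a dict keyed by the character, instead of A's scan over zipped adjacent pairs with a dict keyed by the pair; both then test whether any accumulated count equals 1.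
import Mathlib
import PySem

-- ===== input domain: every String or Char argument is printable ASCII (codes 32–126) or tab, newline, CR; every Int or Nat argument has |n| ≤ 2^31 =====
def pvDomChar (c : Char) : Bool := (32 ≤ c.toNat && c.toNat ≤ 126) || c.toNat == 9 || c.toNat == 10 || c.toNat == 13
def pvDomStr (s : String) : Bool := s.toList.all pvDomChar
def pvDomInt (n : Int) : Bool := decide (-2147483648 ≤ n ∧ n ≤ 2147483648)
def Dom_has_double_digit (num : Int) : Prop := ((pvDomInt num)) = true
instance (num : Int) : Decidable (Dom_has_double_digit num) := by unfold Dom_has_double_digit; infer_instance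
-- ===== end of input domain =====

-- B splits str(num) into maximal runs of equal characters and accumulates (run_length - 1)
-- per character in a dict keyed by the character; objective: alternative decomposition
-- (maximal runs instead of a scan over adjacent pairs).

-- ===== PORT A =====
def has_double_digit (num : Int) : Bool :=
  let s := PySem.Int.toChars num
  let pairs := s.zip (PySem.List.slice s (some 1) none)
  let count_pairs : PySem.Dict (Char × Char) Int :=
    pairs.foldl (fun d p =>
      if p.1 == p.2 then
        if d.contains p then d.insert p (d.getD p 0 + 1) else d.insert p 1
      else d) PySem.Dict.empty
  decide ((1 : Int) ∈ count_pairs.values)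

-- ===== PORT B =====
-- _runs_go: runs of (c repeated n times ++ s), the run of c possibly continuing into s
def bRunsGo (c : Char) (n : Nat) : List Char → List (Char × Nat)
  | [] => [(c, n)]
  | x :: t => if x == c then bRunsGo c (n + 1) t else (c, n) :: bRunsGo x 1 t

-- _runs: maximal runs of equal characters, as (char, length) pairs
def bRuns : List Char → List (Char × Nat)
  | [] => []
  | c :: t => bRunsGo c 1 t

def has_double_digit_alt (num : Int) : Bool :=
  let counts : PySem.Dict Char Int :=
    (bRuns (PySem.Int.toChars num)).foldl
      (fun d p => d.insert p.1 (d.getD p.1 0 + ((p.2 : Int) - 1))) PySem.Dict.empty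
  decide ((1 : Int) ∈ counts.values)

-- ===== PRECONDITION & SPEC =====
def Spec_has_double_digit (num : Int) (out : Bool) : Prop := out = has_double_digit_alt num
instance (num : Int) (out : Bool) : Decidable (Spec_has_double_digit num out) := by unfold Spec_has_double_digit; infer_instance

-- ===== CLAIM (what is proved, stated in full; the proofs are below) =====
def Claim_equal_has_double_digit : Prop := ∀ (num : Int), Dom_has_double_digit num → Spec_has_double_digit num (has_double_digit num)

-- ===== LEMMAS AND PROOFS =====

-- equal adjacent pairs of s, as A collects them
def eqPairs (s : List Char) : List (Char × Char) :=
  (s.zip s.tail).filter (fun p => p.1 == p.2)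

-- what B accumulates for character x over a run list
def sumX (x : Char) (l : List (Char × Nat)) : Int :=
  ((l.filter (fun p => p.1 == x)).map (fun p => (p.2 : Int) - 1)).sum

-- number of equal adjacent pairs of s at character x, as an Int
def cntPairs (x : Char) (s : List Char) : Int :=
  ((eqPairs s).count (x, x) : Int)

theorem sumX_go (x c : Char) (n : Nat) (t : List Char) :
    sumX x (bRunsGo c n t) = (if x = c then (n : Int) - 1 else 0) + cntPairs x (c :: t) := by
  induction t generalizing c n with
  | nil =>
    by_cases hxc : x = c
    · simp [bRunsGo, sumX, cntPairs, eqPairs, hxc]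
    · have hcx : (c == x) = false := by simp; exact fun h => hxc h.symm
      simp [bRunsGo, sumX, cntPairs, eqPairs, hcx, hxc]
  | cons y t' ih =>
    by_cases hyc : y = c
    · subst hyc
      have h1 : bRunsGo y n (y :: t') = bRunsGo y (n + 1) t' := by simp [bRunsGo]
      rw [h1, ih]
      have h2 : cntPairs x (y :: y :: t') = (if x = y then 1 else 0) + cntPairs x (y :: t') := by
        simp only [cntPairs, eqPairs, List.zip_cons_cons, List.tail_cons, List.filter_cons]
        simp only [beq_self_eq_true, if_pos]
        by_cases hxy : x = y
        · subst hxy; simp; omega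
        · simp [List.count_cons, hxy]
          exact fun h => hxy h.symm
      rw [h2]
      split_ifs <;> push_cast <;> ring
    · have h1 : bRunsGo c n (y :: t') = (c, n) :: bRunsGo y 1 t' := by
        simp [bRunsGo, hyc]
      rw [h1]
      have h2 : sumX x ((c, n) :: bRunsGo y 1 t')
          = (if x = c then (n : Int) - 1 else 0) + sumX x (bRunsGo y 1 t') := by
        simp only [sumX, List.filter_cons]
        by_cases hxc : x = c
        · simp [hxc]
        · have : ((c, n).1 == x) = false := by simp; exact fun h => hxc h.symm
          simp [this, hxc]
      rw [h2, ih]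
      have h3 : cntPairs x (c :: y :: t') = cntPairs x (y :: t') := by
        simp only [cntPairs, eqPairs, List.zip_cons_cons, List.tail_cons, List.filter_cons]
        have : ((c, y).1 == (c, y).2) = false := by simp; exact fun h => hyc h.symm
        simp [this]
      rw [h3]
      split_ifs <;> push_cast <;> ring_nf

theorem sumX_bRuns (x : Char) (s : List Char) : sumX x (bRuns s) = cntPairs x s := by
  cases s with
  | nil => simp [bRuns, sumX, cntPairs, eqPairs]
  | cons c t =>
    show sumX x (bRunsGo c 1 t) = _
    rw [sumX_go]; simp

theorem mem_go (x c : Char) (n : Nat) (t : List Char) :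
    x ∈ (bRunsGo c n t).map (·.1) ↔ x = c ∨ x ∈ t := by
  induction t generalizing c n with
  | nil => simp [bRunsGo]
  | cons y t' ih =>
    by_cases hyc : y = c
    · subst hyc
      have h1 : bRunsGo y n (y :: t') = bRunsGo y (n + 1) t' := by simp [bRunsGo]
      rw [h1, ih]; simp
    · have h1 : bRunsGo c n (y :: t') = (c, n) :: bRunsGo y 1 t' := by simp [bRunsGo, hyc]
      rw [h1]; simp [ih]

theorem mem_bRuns (x : Char) (s : List Char) : x ∈ (bRuns s).map (·.1) ↔ x ∈ s := by
  cases s with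
  | nil => simp [bRuns]
  | cons c t => show x ∈ (bRunsGo c 1 t).map (·.1) ↔ _; rw [mem_go]; simp

-- B's dict lookup after the whole fold
theorem getD_foldl_insert_add (l : List (Char × Nat)) (d : PySem.Dict Char Int) (x : Char) :
    (l.foldl (fun d p => d.insert p.1 (d.getD p.1 0 + ((p.2 : Int) - 1))) d).getD x 0
      = d.getD x 0 + sumX x l := by
  induction l generalizing d with
  | nil => simp [sumX]
  | cons p l' ih =>
    simp only [List.foldl_cons, ih]
    have hs : sumX x (p :: l') = (if p.1 == x then (p.2 : Int) - 1 else 0) + sumX x l' := by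
      simp only [sumX, List.filter_cons]
      split_ifs <;> simp
    rw [hs, PySem.Dict.getD_insert]
    by_cases hxp : x = p.1
    · simp [hxp]; ring
    · have : (p.1 == x) = false := by simp; exact fun h => hxp h.symm
      simp [hxp, this]

-- A's loop is exactly Counter(eqPairs s)
theorem aDict_eq_counter (s : List Char) :
    (((s.zip s.tail).foldl (fun d p =>
        if p.1 == p.2 then
          if d.contains p then d.insert p (d.getD p 0 + 1) else d.insert p 1
        else d) (PySem.Dict.empty : PySem.Dict (Char × Char) Int)))
      = PySem.Dict.counter (eqPairs s) := by
  rw [PySem.List.foldl_if_eq_foldl_filter]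
  rw [← PySem.Dict.foldl_insert_getD_add_one_eq_counter]
  apply PySem.List.foldl_congr_mem
  intro d p _
  by_cases hc : d.contains p
  · simp [hc]
  · have h0 : d.getD p 0 = 0 :=
      PySem.Dict.getD_of_not_contains d 0 (by simpa using hc)
    simp [hc, h0]

theorem has_double_digit_eq (num : Int) :
    has_double_digit num
      = decide (∃ p ∈ eqPairs (PySem.Int.toChars num), ((eqPairs (PySem.Int.toChars num)).count p : Int) = 1) := by
  show decide _ = decide _
  have h1 : PySem.List.slice (PySem.Int.toChars num) (some 1) none = (PySem.Int.toChars num).tail :=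
    PySem.List.slice_from_one _
  rw [h1]
  rw [aDict_eq_counter]
  congr 1
  simp only [eq_iff_iff]
  constructor
  · intro hmem
    have : (PySem.Dict.counter (eqPairs (PySem.Int.toChars num))).values
        = ((PySem.Set.ofList (eqPairs (PySem.Int.toChars num))).map
            (fun k => ((eqPairs (PySem.Int.toChars num)).count k : Int))) := by
      show (PySem.Dict.counter _).items.map _ = _
      rw [PySem.Dict.items_counter]; simp [List.map_map, Function.comp]
    rw [this] at hmem
    obtain ⟨k, hk, hv⟩ := List.mem_map.mp hmem
    exact ⟨k, (PySem.Set.mem_ofList _ _).mp hk, hv⟩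
  · rintro ⟨p, hp, hc⟩
    have : (PySem.Dict.counter (eqPairs (PySem.Int.toChars num))).values
        = ((PySem.Set.ofList (eqPairs (PySem.Int.toChars num))).map
            (fun k => ((eqPairs (PySem.Int.toChars num)).count k : Int))) := by
      show (PySem.Dict.counter _).items.map _ = _
      rw [PySem.Dict.items_counter]; simp [List.map_map, Function.comp]
    rw [this]
    exact List.mem_map.mpr ⟨p, (PySem.Set.mem_ofList _ _).mpr hp, hc⟩

theorem has_double_digit_alt_eq (num : Int) :
    has_double_digit_alt num
      = decide (∃ x ∈ PySem.Int.toChars num, cntPairs x (PySem.Int.toChars num) = 1) := by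
  show decide _ = decide _
  congr 1
  simp only [eq_iff_iff]
  set s := PySem.Int.toChars num with hs
  set l := bRuns s with hl
  have hkeys : ((l.foldl (fun d p => d.insert p.1 (d.getD p.1 0 + ((p.2 : Int) - 1)))
      (PySem.Dict.empty : PySem.Dict Char Int))).keys = PySem.Set.ofList (l.map (·.1)) := by
    rw [PySem.Dict.keys_foldl_insert_key]
    simp [PySem.Set.ofList_eq_foldl, PySem.Set.update, PySem.Dict.keys_empty]
  have hnodup : ((l.foldl (fun d p => d.insert p.1 (d.getD p.1 0 + ((p.2 : Int) - 1)))
      (PySem.Dict.empty : PySem.Dict Char Int))).keys.Nodup :=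
    PySem.Dict.nodup_keys_foldl_insert_key _ _ _ _ (by simp [PySem.Dict.keys_empty])
  have hvals := PySem.Dict.values_eq_map_keys _ hnodup (0 : Int)
  rw [hvals, hkeys]
  constructor
  · intro hmem
    obtain ⟨k, hk, hv⟩ := List.mem_map.mp hmem
    have hk' : k ∈ l.map (·.1) := (PySem.Set.mem_ofList _ _).mp hk
    refine ⟨k, (mem_bRuns k s).mp hk', ?_⟩
    rw [getD_foldl_insert_add, sumX_bRuns] at hv
    simpa using hv
  · rintro ⟨x, hx, hc⟩
    refine List.mem_map.mpr ⟨x, (PySem.Set.mem_ofList _ _).mpr ((mem_bRuns x s).mpr hx), ?_⟩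
    rw [getD_foldl_insert_add, sumX_bRuns]
    simpa using hc

theorem exists_iff (s : List Char) :
    (∃ p ∈ eqPairs s, ((eqPairs s).count p : Int) = 1) ↔ (∃ x ∈ s, cntPairs x s = 1) := by
  constructor
  · rintro ⟨p, hp, hc⟩
    have hfil := List.of_mem_filter hp
    have heq : p.1 = p.2 := by simpa [beq_iff_eq] using hfil
    have hzip : p ∈ s.zip s.tail := List.mem_of_mem_filter hp
    have hp1 : p.1 ∈ s := by
      obtain ⟨a, b⟩ := p
      exact (List.of_mem_zip hzip).1
    refine ⟨p.1, hp1, ?_⟩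
    have hpp : p = (p.1, p.1) := by
      obtain ⟨a, b⟩ := p; simp at heq ⊢; exact heq.symm
    rw [cntPairs, ← hpp]; exact hc
  · rintro ⟨x, _, hc⟩
    have hcnt : (eqPairs s).count (x, x) = 1 := by
      rw [cntPairs] at hc; exact_mod_cast hc
    have hmem : (x, x) ∈ eqPairs s := List.count_pos_iff.mp (by omega)
    exact ⟨(x, x), hmem, by rw [cntPairs] at hc; exact hc⟩

-- ===== VERDICT (by name: the statement is the Claim_ definition above) =====
theorem has_double_digit_spec : Claim_equal_has_double_digit := by
  intro num _
  show has_double_digit num = has_double_digit_alt num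
  rw [has_double_digit_eq, has_double_digit_alt_eq]
  congr 1
  simp only [eq_iff_iff]
  exact exists_iff (PySem.Int.toChars num)
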